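-- pv_equiv track=rewrite | github.com/prathik-18-bot/Ticket-System | FullStack Python/Backend/Validator/generalvalidation.py | check_is_valid_userid
-- ===== SOURCE A (Python) =====
-- def check_is_valid_userid(value):
--     data=list(value)
--     a=0
--     b=0
--     c=0
--     for i in data:
--         if i.isdigit():
--             a=a+1
--         if i.isalpha():
--             if i.islower():
--                  b=b+1
--             else:
--                  c=c+1
--     if(a>0 and b>0 and c>0 and len(data)>5):
--         return True
--     return False
-- ===== SOURCE B (Python) =====
-- def check_is_valid_userid(value):
--     data = list(value)
--     return (len(data) > 5
--             and any(i.isdigit() for i in data)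
--             and any(i.islower() for i in data)
--             and any(i.isalpha() and not i.islower() for i in data))
-- ===== Notes on version B (the rewrite author's own statement) =====
-- stated objective: idiomatic
-- what changed: Replaced the single counting pass with three integer accumulators and a final threshold test by one boolean expression: a length check and three short-circuiting any(...) existence scans (digit, lower, alpha-and-not-lower).
import Mathlib
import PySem

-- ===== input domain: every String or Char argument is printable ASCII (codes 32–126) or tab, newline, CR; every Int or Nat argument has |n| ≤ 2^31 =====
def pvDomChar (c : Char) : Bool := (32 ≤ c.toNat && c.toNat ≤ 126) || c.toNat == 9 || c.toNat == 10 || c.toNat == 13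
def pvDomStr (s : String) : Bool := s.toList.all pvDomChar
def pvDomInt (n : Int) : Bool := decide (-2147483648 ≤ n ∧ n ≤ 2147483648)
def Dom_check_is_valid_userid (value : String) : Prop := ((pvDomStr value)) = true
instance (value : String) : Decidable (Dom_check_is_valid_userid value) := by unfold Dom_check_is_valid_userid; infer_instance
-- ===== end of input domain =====

-- B replaces A's single counting pass (three accumulators + threshold test) by one boolean
-- expression of a length check and three short-circuiting existence scans (idiomatic; same cost).

-- ===== PORT A =====
def check_is_valid_userid (value : String) : Bool :=
  let data := value.toList
  let s := data.foldl (fun (s : Int × Int × Int) i =>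
    let s := if PySem.Chars.isdigit i then (s.1 + 1, s.2.1, s.2.2) else s
    if PySem.Chars.isalpha i then
      if PySem.Chars.islower i then (s.1, s.2.1 + 1, s.2.2)
      else (s.1, s.2.1, s.2.2 + 1)
    else s) (0, 0, 0)
  if s.1 > 0 ∧ s.2.1 > 0 ∧ s.2.2 > 0 ∧ ((data.length : Int) > 5) then true else false

-- ===== PORT B =====
def check_is_valid_userid_alt (value : String) : Bool :=
  let data := value.toList
  decide ((data.length : Int) > 5)
  && data.any (fun i => PySem.Chars.isdigit i)
  && data.any (fun i => PySem.Chars.islower i)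
  && data.any (fun i => PySem.Chars.isalpha i && !PySem.Chars.islower i)

-- ===== PRECONDITION & SPEC =====
def Spec_check_is_valid_userid (value : String) (out : Bool) : Prop := out = check_is_valid_userid_alt value
instance (value : String) (out : Bool) : Decidable (Spec_check_is_valid_userid value out) := by unfold Spec_check_is_valid_userid; infer_instance

-- ===== CLAIM (what is proved, stated in full; the proofs are below) =====
def Claim_equal_check_is_valid_userid : Prop := ∀ (value : String), Dom_check_is_valid_userid value → Spec_check_is_valid_userid value (check_is_valid_userid value)

-- ===== LEMMAS AND PROOFS =====

-- A's counting loop computes the three countP's.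
theorem pv_fold_counts (l : List Char) (a b c : Int) :
    (l.foldl (fun (s : Int × Int × Int) i =>
      let s := if PySem.Chars.isdigit i then (s.1 + 1, s.2.1, s.2.2) else s
      if PySem.Chars.isalpha i then
        if PySem.Chars.islower i then (s.1, s.2.1 + 1, s.2.2)
        else (s.1, s.2.1, s.2.2 + 1)
      else s) (a, b, c))
    = (a + (l.countP (fun i => PySem.Chars.isdigit i) : Int),
       b + (l.countP (fun i => PySem.Chars.isalpha i && PySem.Chars.islower i) : Int),
       c + (l.countP (fun i => PySem.Chars.isalpha i && !PySem.Chars.islower i) : Int)) := by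
  induction l generalizing a b c with
  | nil => simp
  | cons x xs ih =>
    simp only [List.foldl_cons, List.countP_cons]
    by_cases hd : PySem.Chars.isdigit x <;>
      by_cases ha : PySem.Chars.isalpha x <;>
        by_cases hl : PySem.Chars.islower x <;>
          simp [hd, ha, hl, ih] <;> omega

theorem pv_islower_alpha (i : Char) :
    (PySem.Chars.isalpha i && PySem.Chars.islower i) = PySem.Chars.islower i := by
  cases h : PySem.Chars.islower i <;> simp [PySem.Chars.isalpha, h]

-- ===== VERDICT (by name: the statement is the Claim_ definition above) =====
theorem check_is_valid_userid_spec : Claim_equal_check_is_valid_userid := by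
  intro value _
  unfold Spec_check_is_valid_userid check_is_valid_userid check_is_valid_userid_alt
  simp only [pv_fold_counts, pv_islower_alpha, zero_add]
  rw [Bool.eq_iff_iff]
  simp [List.any_eq_true, List.countP_pos_iff, Int.natCast_pos]
  tauto
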